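-- pv_equiv track=rewrite | github.com/poynt2005/finalNLPProject | samplePinyin/parse_input.py | parseInputMultiple
-- ===== SOURCE A (Python) =====
-- def parseInputMultiple(inputStr):
--     x0 = [i for i in inputStr.split(' ') if i]
--     x1 = []
--     x2 = []
--
--
--     def s(a, b):
--         sa = a[:]
--         sb = b[:]
--         if not sb:
--             x2.append(sa)
--             return
--         sa.append(b[0])
--         s(sa, sb[1:])
--
--         if len(sb) == 1:
--             return
--         sa[-1] = b[0] + ' ' + b[1]
--         s(sa, sb[2:])
--
--
--     s(x1, x0)
--     return(x2)
-- ===== SOURCE B (Python) =====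
-- def parseInputMultiple(inputStr):
--     toks = [i for i in inputStr.split(' ') if i]
--     # bottom-up DP over suffixes, right to left, with rolling state:
--     # dp1 = segmentations of toks[i+1:], dp2 = segmentations of toks[i+2:], prev = toks[i+1]
--     dp1, dp2, prev = [[]], None, None
--     for tok in reversed(toks):
--         segs = [[tok] + r for r in dp1]
--         if dp2 is not None:
--             segs += [[tok + ' ' + prev] + r for r in dp2]
--         dp1, dp2, prev = segs, dp1, tok
--     return dp1
-- ===== Notes on version B (the rewrite author's own statement) =====
-- stated objective: alternative
-- what changed: Replaced A's side-effecting depth-first recursion that threads an accumulated prefix and appends finished prefixes to an outer list with an iterative bottom-up dynamic-programming loop over the tokens from right to left, keeping rolling state (segmentations of the two shortest remaining suffixes) and no recursion at all.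
import Mathlib
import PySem

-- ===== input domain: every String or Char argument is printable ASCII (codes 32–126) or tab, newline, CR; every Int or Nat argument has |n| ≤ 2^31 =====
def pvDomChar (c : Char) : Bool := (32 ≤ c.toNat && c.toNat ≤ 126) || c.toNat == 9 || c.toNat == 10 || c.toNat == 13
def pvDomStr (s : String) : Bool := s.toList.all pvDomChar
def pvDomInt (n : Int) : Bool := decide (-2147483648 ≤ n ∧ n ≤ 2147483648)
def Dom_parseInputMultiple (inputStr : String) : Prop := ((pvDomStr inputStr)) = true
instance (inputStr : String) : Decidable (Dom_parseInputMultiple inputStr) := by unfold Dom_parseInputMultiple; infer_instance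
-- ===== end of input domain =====

-- B replaces A's side-effecting prefix-threading recursion with an iterative bottom-up
-- dynamic-programming loop over the tokens from right to left (objective: alternative).

-- ===== PORT A =====
-- A's helper s(a, b): threads the accumulated prefix a, appends finished prefixes to x2
-- (modelled as the returned list, in A's append order).
def pvS_parseInputMultiple (a b : List String) : List (List String) :=
  match b with
  | [] => [a]
  | b0 :: btl =>
    pvS_parseInputMultiple (a ++ [b0]) btl ++
      (match btl with
       | [] => []
       | b1 :: btl2 => pvS_parseInputMultiple (a ++ [b0 ++ " " ++ b1]) btl2)
termination_by b.length
decreasing_by all_goals (simp_all; try omega)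

def parseInputMultiple (inputStr : String) : List (List String) :=
  let x0 := ((PySem.Str.split? inputStr " ").getD []).filter (fun i => i ≠ "")
  pvS_parseInputMultiple [] x0

-- ===== PORT B =====
-- B's loop body: state is (dp1, dp2, prev) = (segmentations of toks[i+1:],
-- segmentations of toks[i+2:] or none before the second step, token toks[i+1] or none).
def pvStep_parseInputMultiple
    (st : List (List String) × Option (List (List String)) × Option String)
    (tok : String) :
    List (List String) × Option (List (List String)) × Option String :=
  let segs := st.1.map (fun r => tok :: r) ++
    (match st.2.1, st.2.2 with
     | some dp2, some prev => dp2.map (fun r => (tok ++ " " ++ prev) :: r)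
     | _, _ => [])
  (segs, some st.1, some tok)

def parseInputMultiple_alt (inputStr : String) : List (List String) :=
  let toks := ((PySem.Str.split? inputStr " ").getD []).filter (fun i => i ≠ "")
  (toks.reverse.foldl pvStep_parseInputMultiple ([[]], none, none)).1

-- ===== PRECONDITION & SPEC =====
def Spec_parseInputMultiple (inputStr : String) (out : List (List String)) : Prop := out = parseInputMultiple_alt inputStr
instance (inputStr : String) (out : List (List String)) : Decidable (Spec_parseInputMultiple inputStr out) := by unfold Spec_parseInputMultiple; infer_instance

-- ===== CLAIM =====
def Claim_equal_parseInputMultiple : Prop := ∀ (inputStr : String), Dom_parseInputMultiple inputStr → Spec_parseInputMultiple inputStr (parseInputMultiple inputStr)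

-- ===== LEMMAS AND PROOFS =====
-- Common specification: all segmentations of a token list, single-token branch first.
def pvSeg (tokens : List String) : List (List String) :=
  match tokens with
  | [] => [[]]
  | t0 :: ttl =>
    (pvSeg ttl).map (fun rest => t0 :: rest) ++
      (match ttl with
       | [] => []
       | t1 :: ttl2 => (pvSeg ttl2).map (fun rest => (t0 ++ " " ++ t1) :: rest))
termination_by tokens.length
decreasing_by all_goals (simp_all; try omega)

theorem pvS_eq_map_pvSeg (a b : List String) :
    pvS_parseInputMultiple a b = (pvSeg b).map (fun rest => a ++ rest) := by
  induction a, b using pvS_parseInputMultiple.induct with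
  | case1 a => simp [pvS_parseInputMultiple, pvSeg]
  | case2 a b0 btl ih1 ih2 =>
    cases btl with
    | nil =>
      simp [pvS_parseInputMultiple, pvSeg, ih1]
    | cons b1 btl2 =>
      simp only [pvS_parseInputMultiple, pvSeg, ih1, ih2, List.map_append, List.map_map]
      congr 1 <;> (apply List.map_congr_left; intro x _; simp)

-- Loop invariant for B: after consuming l.reverse, the state is
-- (pvSeg l, segmentations of l.tail / head of l, in Option form).
theorem pvFold_inv (l : List String) :
    l.reverse.foldl pvStep_parseInputMultiple ([[]], none, none) =
      (pvSeg l,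
       match l with
       | [] => (none, none)
       | _ :: tl => (some (pvSeg tl), some l.head!)) := by
  induction l with
  | nil => simp [pvSeg]
  | cons t ttl ih =>
    rw [List.reverse_cons, List.foldl_append, ih]
    cases ttl with
    | nil => simp [pvStep_parseInputMultiple, pvSeg]
    | cons t1 ttl2 => simp [pvStep_parseInputMultiple, pvSeg]

-- ===== VERDICT =====
theorem parseInputMultiple_spec : Claim_equal_parseInputMultiple := by
  intro s _
  unfold Spec_parseInputMultiple parseInputMultiple parseInputMultiple_alt
  show pvS_parseInputMultiple [] _ =
    (List.foldl pvStep_parseInputMultiple ([[]], none, none) (List.reverse _)).1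
  rw [pvFold_inv, pvS_eq_map_pvSeg]
  simp
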